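-- pv_equiv track=rewrite | github.com/feli10/math-coding | _cn/g411_large_numbers/read_number.py | read_level_number
-- ===== SOURCE A (Python) =====
-- DIGITS = ['', '一', '二', '三', '四', '五', '六', '七', '八', '九']
--
-- COUNTING_UNITS = ['千', '百', '十', '']
--
-- def read_level_number(num):
--     """按照个级的读法把一个数级的数读出来。
--
--     num: 字符串类型的自然数 (0-9999之间)。
--     """
--     # 在一个数级中如果是十或十几开头（前面没有零），读作 “十” 或 “十几”。
--     if num[0] != '0' and 10 <= int(num) < 20:
--         return '十' + DIGITS[int(num) - 10]
--
--     digit_count = len(num)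
--     # 每级末尾不管有几个零都不读。
--     none_trailing_zero_digit_count = len(num.rstrip('0'))
--     text = ''
--     after_zero = False
--     for i in range(none_trailing_zero_digit_count):
--         digit = int(num[i])
--         # 每级除末尾外的其他数位，有一个零或连续几个零，都只读一个零。
--         if digit == 0 and not after_zero:
--             text += '零'
--             after_zero = True
--         elif digit != 0:
--             text += DIGITS[digit] + COUNTING_UNITS[4 - digit_count + i]
--             after_zero = False
--     return text
-- ===== SOURCE B (Python) =====
-- DIGITS = ['', '一', '二', '三', '四', '五', '六', '七', '八', '九']
--
-- COUNTING_UNITS = ['千', '百', '十', '']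
--
-- def read_level_number(num):
--     if num[0] != '0' and 10 <= int(num) < 20:
--         return '十' + DIGITS[int(num) - 10]
--     offset = 4 - len(num)
--     sig = num.rstrip('0')
--     # one piece per significant digit: a zero digit is a plain '零'
--     parts = ['零' if c == '0' else DIGITS[int(c)] + COUNTING_UNITS[offset + i]
--              for i, c in enumerate(sig)]
--     # drop a '零' piece whenever the previous piece is also '零'
--     return ''.join(p for prev, p in zip([''] + parts[:-1], parts)
--                    if p != '零' or prev != '零')
-- ===== Notes on version B (the rewrite author's own statement) =====
-- stated objective: alternative
-- what changed: A builds the text in one stateful pass with an after_zero flag; B first materialises one piece per significant digit (a plain '零' for a zero) and then removes each '零' piece that directly follows another '零' piece via a zip-with-predecessor filter before joining.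
import Mathlib
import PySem

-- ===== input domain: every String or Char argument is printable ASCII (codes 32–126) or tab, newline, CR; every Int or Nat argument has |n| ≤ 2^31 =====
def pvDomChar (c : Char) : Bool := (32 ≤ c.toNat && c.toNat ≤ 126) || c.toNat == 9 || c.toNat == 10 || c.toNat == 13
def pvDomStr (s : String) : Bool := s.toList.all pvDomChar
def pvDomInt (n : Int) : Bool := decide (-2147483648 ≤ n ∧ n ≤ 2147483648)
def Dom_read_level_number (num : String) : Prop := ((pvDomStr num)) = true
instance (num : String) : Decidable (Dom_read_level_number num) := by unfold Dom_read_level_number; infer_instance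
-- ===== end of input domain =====

-- B re-decomposes A's stateful loop: it builds one piece per significant digit, then drops a
-- '零' piece whose predecessor piece is also '零' (objective: alternative decomposition, not faster).

-- ===== PORT A =====
def pvDIGITS : List (List Char) := [[], ['一'], ['二'], ['三'], ['四'], ['五'], ['六'], ['七'], ['八'], ['九']]

def pvUNITS : List (List Char) := [['千'], ['百'], ['十'], []]

-- the guard `num[0] != '0' and 10 <= int(num) < 20` (this source line is shared verbatim by A and B)
def pvTenGuard (num : String) : Bool :=
  match PySem.Str.pyGet? num 0 with
  | none => false          -- IndexError on num[0]: excluded by Pre_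
  | some c => c != '0' && (match PySem.Int.ofStr? num with
      | none => false      -- ValueError from int(num): excluded by Pre_
      | some n => decide (10 ≤ n ∧ n < 20))

-- int(num[i]) on a single character; Pre_ guarantees it parses (digit), so getD 0 is never hit
def pvDigitVal (c : Char) : Int := (PySem.Int.ofChars? [c]).getD 0

-- num.rstrip('0'), exact by hand: remove exactly the trailing zero-digit characters
def pvRstrip0 (cs : List Char) : List Char := (cs.reverse.dropWhile (· == '0')).reverse

-- loop body of A: digit = int(num[i]); the two branches in source order
def pvStepA (digit_count : Int) (cs : List Char) (st : List Char × Bool) (i : Int) : List Char × Bool :=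
  let digit := pvDigitVal (PySem.List.pyGetD cs i ' ')
  if digit = 0 ∧ st.2 = false then (st.1 ++ ['零'], true)
  else if ¬ digit = 0 then
    (st.1 ++ (PySem.List.pyGetD pvDIGITS digit [] ++ PySem.List.pyGetD pvUNITS (4 - digit_count + i) []), false)
  else st

def read_level_number (num : String) : String :=
  if pvTenGuard num then
    String.ofList ('十' :: PySem.List.pyGetD pvDIGITS ((PySem.Int.ofStr? num).getD 0 - 10) [])
  else
    let cs := num.toList
    let digit_count : Int := cs.length
    let none_trailing : Int := (pvRstrip0 cs).length
    let res := (PySem.List.pyRange 0 none_trailing).foldl (pvStepA digit_count cs) ([], false)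
    String.ofList res.1

-- ===== PORT B =====
-- one piece per significant position: '零' for a zero digit, DIGITS[int(c)] + COUNTING_UNITS[offset+i] otherwise
def pvPiece (offset : Int) (ic : Int × Char) : List Char :=
  if ic.2 == '0' then ['零']
  else PySem.List.pyGetD pvDIGITS (pvDigitVal ic.2) [] ++ PySem.List.pyGetD pvUNITS (offset + ic.1) []

-- keep a piece unless it is '零' right after another '零' piece
def pvKeep (pp : List Char × List Char) : Bool := pp.2 != ['零'] || pp.1 != ['零']

def read_level_number_alt (num : String) : String :=
  if pvTenGuard num then
    String.ofList ('十' :: PySem.List.pyGetD pvDIGITS ((PySem.Int.ofStr? num).getD 0 - 10) [])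
  else
    let offset : Int := 4 - PySem.Str.len num
    let sig := pvRstrip0 num.toList
    let parts := (PySem.List.enumerate sig).map (pvPiece offset)
    let kept := (List.zip ([] :: parts.dropLast) parts).filter pvKeep
    String.ofList ((kept.map (·.2)).flatten)

-- ===== PRECONDITION & SPEC =====
-- Pre_ = exactly the inputs where the Python A returns normally: num is non-empty and either the
-- ten-to-nineteen guard fires (first character not the zero digit, int(num) parses into [10,20))
-- or num is all ASCII digits with every nonzero digit among the last 8 positions (otherwise
-- COUNTING_UNITS[…] is an IndexError in both programs).
def Pre_read_level_number (num : String) : Prop :=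
  num.toList ≠ [] ∧
  ((num.toList.headI ≠ '0' ∧ PySem.Int.ofStr? num ≠ none ∧
      10 ≤ (PySem.Int.ofStr? num).getD 0 ∧ (PySem.Int.ofStr? num).getD 0 < 20)
   ∨ (num.toList.all Char.isDigit = true ∧
      (num.toList.take (num.toList.length - 8)).all (· == '0') = true))

instance (num : String) : Decidable (Pre_read_level_number num) := by
  unfold Pre_read_level_number; infer_instance

def pvWitness_read_level_number : String := "0012"

def Spec_read_level_number (num : String) (out : String) : Prop := out = read_level_number_alt num
instance (num : String) (out : String) : Decidable (Spec_read_level_number num out) := by unfold Spec_read_level_number; infer_instance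

-- ===== CLAIM (what is proved, stated in full; the proofs are below) =====
def Claim_equal_read_level_number : Prop := ∀ (num : String), Dom_read_level_number num → Pre_read_level_number num → Spec_read_level_number num (read_level_number num)

-- ===== LEMMAS AND PROOFS =====

-- the common value both loops produce, reading (index, char) pairs with an after-zero flag
def pvRun (dc : Int) : Bool → List (Int × Char) → List Char
  | _, [] => []
  | az, ic :: rest =>
    if ic.2 = '0' then (if az then [] else ['零']) ++ pvRun dc true rest
    else pvPiece (4 - dc) ic ++ pvRun dc false rest

-- A's loop body, reading the character from the pair instead of indexing cs
def pvStepP (dc : Int) (st : List Char × Bool) (ic : Int × Char) : List Char × Bool :=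
  let digit := pvDigitVal ic.2
  if digit = 0 ∧ st.2 = false then (st.1 ++ ['零'], true)
  else if ¬ digit = 0 then
    (st.1 ++ (PySem.List.pyGetD pvDIGITS digit [] ++ PySem.List.pyGetD pvUNITS (4 - dc + ic.1) []), false)
  else st

theorem pvStepA_eq (dc : Int) (cs : List Char) :
    pvStepA dc cs = fun st i => pvStepP dc st (i, PySem.List.pyGetD cs i ' ') := rfl

theorem pv_digit_cases (c : Char) (h : c.isDigit = true) :
    c = '0' ∨ c = '1' ∨ c = '2' ∨ c = '3' ∨ c = '4' ∨ c = '5' ∨ c = '6' ∨ c = '7' ∨ c = '8' ∨ c = '9' := by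
  simp [Char.isDigit] at h
  obtain ⟨h1, h2⟩ := h
  have h1' : 48 ≤ c.toNat := h1
  have h2' : c.toNat ≤ 57 := h2
  have hco := Char.ofNat_toNat c
  interval_cases h : c.toNat <;> subst hco <;> decide

theorem pv_piece_facts (c : Char) (hd : c.isDigit = true) (hne : c ≠ '0') (u : List Char) :
    pvDigitVal c ≠ 0 ∧ PySem.List.pyGetD pvDIGITS (pvDigitVal c) [] ++ u ≠ ['零'] := by
  rcases pv_digit_cases c hd with h|h|h|h|h|h|h|h|h|h <;> subst h
  · exact absurd rfl hne
  · exact ⟨by decide, by rw [show PySem.List.pyGetD pvDIGITS (pvDigitVal '1') [] = ['一'] from by decide]; simp⟩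
  · exact ⟨by decide, by rw [show PySem.List.pyGetD pvDIGITS (pvDigitVal '2') [] = ['二'] from by decide]; simp⟩
  · exact ⟨by decide, by rw [show PySem.List.pyGetD pvDIGITS (pvDigitVal '3') [] = ['三'] from by decide]; simp⟩
  · exact ⟨by decide, by rw [show PySem.List.pyGetD pvDIGITS (pvDigitVal '4') [] = ['四'] from by decide]; simp⟩
  · exact ⟨by decide, by rw [show PySem.List.pyGetD pvDIGITS (pvDigitVal '5') [] = ['五'] from by decide]; simp⟩
  · exact ⟨by decide, by rw [show PySem.List.pyGetD pvDIGITS (pvDigitVal '6') [] = ['六'] from by decide]; simp⟩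
  · exact ⟨by decide, by rw [show PySem.List.pyGetD pvDIGITS (pvDigitVal '7') [] = ['七'] from by decide]; simp⟩
  · exact ⟨by decide, by rw [show PySem.List.pyGetD pvDIGITS (pvDigitVal '8') [] = ['八'] from by decide]; simp⟩
  · exact ⟨by decide, by rw [show PySem.List.pyGetD pvDIGITS (pvDigitVal '9') [] = ['九'] from by decide]; simp⟩

-- A's pair fold produces pvRun
theorem pvA_fold (dc : Int) (ps : List (Int × Char)) (hd : ∀ p ∈ ps, p.2.isDigit = true)
    (t : List Char) (az : Bool) :
    (ps.foldl (pvStepP dc) (t, az)).1 = t ++ pvRun dc az ps := by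
  induction ps generalizing t az with
  | nil => simp [pvRun]
  | cons ic rest ih =>
    have hdc := hd ic (by simp)
    have hdr : ∀ p ∈ rest, p.2.isDigit = true := fun p hp => hd p (by simp [hp])
    rw [List.foldl_cons]
    by_cases hc : ic.2 = '0'
    · have hz : pvDigitVal ic.2 = 0 := by rw [hc]; decide
      cases az with
      | false =>
        have hstep : pvStepP dc (t, false) ic = (t ++ ['零'], true) := by simp [pvStepP, hz]
        rw [hstep, ih hdr]
        simp [pvRun, hc]
      | true =>
        have hstep : pvStepP dc (t, true) ic = (t, true) := by simp [pvStepP, hz]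
        rw [hstep, ih hdr]
        simp [pvRun, hc]
    · obtain ⟨hnz, -⟩ := pv_piece_facts ic.2 hdc hc []
      have hstep : pvStepP dc (t, az) ic =
          (t ++ (PySem.List.pyGetD pvDIGITS (pvDigitVal ic.2) [] ++
            PySem.List.pyGetD pvUNITS (4 - dc + ic.1) []), false) := by
        simp [pvStepP, hnz]
      rw [hstep, ih hdr]
      simp [pvRun, pvPiece, hc, List.append_assoc]

-- fold over range(len L) indexing cs = fold over the (index, char) pairs of L
theorem pvRange_fold {β : Type} (cs : List Char) (L : List Char) (f : β → (Int × Char) → β)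
    (k : Int) (init : β)
    (hpre : ∀ (j : Nat), (h : j < L.length) → PySem.List.pyGetD cs (k + j) ' ' = L[j]) :
    (PySem.List.pyRange k (k + L.length)).foldl (fun st i => f st (i, PySem.List.pyGetD cs i ' ')) init
      = (PySem.List.enumerate L k).foldl f init := by
  induction L generalizing k init with
  | nil => simp [PySem.List.enumerate, PySem.List.pyRange]
  | cons c L ih =>
    have hlen : (((c :: L).length : Nat) : Int) = (L.length : Int) + 1 := by
      push_cast [List.length_cons]; ring
    have hlt : k < k + (((c :: L).length : Nat) : Int) := by omega
    rw [PySem.List.pyRange_one_cons hlt, PySem.List.enumerate_cons]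
    simp only [List.foldl_cons]
    have h0 : PySem.List.pyGetD cs k ' ' = c := by
      have := hpre 0 (by simp)
      simpa using this
    rw [h0]
    have harg : k + (((c :: L).length : Nat) : Int) = (k + 1) + (L.length : Int) := by omega
    rw [harg]
    exact ih (k + 1) (f init (k, c)) (fun j hj => by
      have := hpre (j + 1) (by simpa using Nat.succ_lt_succ hj)
      have harg2 : k + ((j + 1 : Nat) : Int) = (k + 1) + (j : Int) := by push_cast; omega
      rw [harg2] at this
      simpa using this)

-- B's zip/filter/join over the piece list produces pvRun
theorem pvB_fold (dc : Int) (ps : List (Int × Char)) (hd : ∀ p ∈ ps, p.2.isDigit = true)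
    (prev : List Char) :
    ((((prev :: (ps.map (pvPiece (4 - dc))).dropLast).zip (ps.map (pvPiece (4 - dc)))).filter
        pvKeep).map (·.2)).flatten
      = pvRun dc (prev == ['零']) ps := by
  induction ps generalizing prev with
  | nil => simp [pvRun]
  | cons ic rest ih =>
    have hdc := hd ic (by simp)
    have hdr : ∀ p ∈ rest, p.2.isDigit = true := fun p hp => hd p (by simp [hp])
    by_cases hc : ic.2 = '0'
    · have hpc : pvPiece (4 - dc) ic = ['零'] := by simp [pvPiece, hc]
      cases rest with
      | nil =>
        by_cases hp : prev = ['零'] <;>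
          simp [List.dropLast_singleton, List.filter, pvKeep, hpc, hp, pvRun, hc]
      | cons r rest' =>
        have tail := ih hdr (pvPiece (4 - dc) ic)
        simp only [List.map_cons, List.dropLast_cons₂, List.zip_cons_cons, List.filter_cons] at tail ⊢
        by_cases hp : prev = ['零']
        · have hk : pvKeep (prev, pvPiece (4 - dc) ic) = false := by
            simp [pvKeep, hp, hpc]
          rw [hk]
          simp only [Bool.false_eq_true, if_false]
          rw [tail]
          simp [pvRun, hc, hp, hpc]
        · have hk : pvKeep (prev, pvPiece (4 - dc) ic) = true := by
            simp [pvKeep, hp]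
          rw [hk]
          simp only [if_true, List.map_cons, List.flatten_cons]
          rw [tail]
          simp [pvRun, hc, hp, hpc]
    · obtain ⟨-, hpne⟩ := pv_piece_facts ic.2 hdc hc (PySem.List.pyGetD pvUNITS (4 - dc + ic.1) [])
      have hpc : pvPiece (4 - dc) ic ≠ ['零'] := by
        simpa [pvPiece, hc] using hpne
      have hk : pvKeep (prev, pvPiece (4 - dc) ic) = true := by
        simp [pvKeep, hpc]
      cases rest with
      | nil =>
        simp [List.dropLast_singleton, List.filter, hk, pvRun, hc]
      | cons r rest' =>
        have tail := ih hdr (pvPiece (4 - dc) ic)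
        simp only [List.map_cons, List.dropLast_cons₂, List.zip_cons_cons, List.filter_cons] at tail ⊢
        rw [hk]
        simp only [if_true, List.map_cons, List.flatten_cons]
        rw [tail]
        simp [pvRun, hc, hpc]

theorem pvRstrip0_prefix (cs : List Char) : pvRstrip0 cs <+: cs := by
  unfold pvRstrip0
  have h : cs.reverse.dropWhile (· == '0') <:+ cs.reverse := List.dropWhile_suffix _
  have h2 := h.reverse
  simpa using h2

-- ===== VERDICT (by name: the statement is the Claim_ definition above) =====
theorem read_level_number_spec : Claim_equal_read_level_number := by
  intro num hdom hpre
  unfold Spec_read_level_number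
  obtain ⟨hne, hcase⟩ := hpre
  by_cases hg : pvTenGuard num = true
  · unfold read_level_number read_level_number_alt
    simp [hg]
  · have hright : num.toList.all Char.isDigit = true ∧
        (num.toList.take (num.toList.length - 8)).all (· == '0') = true := by
      rcases hcase with ⟨h0, hsome, h10, h20⟩ | hr
      · exfalso
        apply hg
        obtain ⟨c, tl, hct⟩ : ∃ c tl, num.toList = c :: tl := by
          cases h : num.toList with
          | nil => exact absurd h hne
          | cons c tl => exact ⟨c, tl, rfl⟩
        obtain ⟨n, hn⟩ : ∃ n, PySem.Int.ofStr? num = some n :=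
          Option.ne_none_iff_exists'.mp hsome
        rw [hn] at h10 h20
        simp only [Option.getD_some] at h10 h20
        have hc0 : c ≠ '0' := by
          rw [hct] at h0; simpa using h0
        unfold pvTenGuard
        have hget : PySem.Str.pyGet? num 0 = some c := by
          simp [PySem.Str.pyGet?, hct]
        rw [hget, hn]
        simp [hc0, h10, h20]
      · exact hr
    obtain ⟨hdig, htrail⟩ := hright
    unfold read_level_number read_level_number_alt
    simp only [hg, if_false, Bool.false_eq_true]
    congr 1
    have hlen : PySem.Str.len num = ((num.toList.length : Nat) : Int) := by
      simp [PySem.Str.len_eq]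
    rw [hlen]
    obtain ⟨tlz, htl⟩ := pvRstrip0_prefix num.toList
    have hdigall : ∀ c ∈ num.toList, c.isDigit = true := List.all_eq_true.mp hdig
    have hdpairs : ∀ p ∈ PySem.List.enumerate (pvRstrip0 num.toList) 0, p.2.isDigit = true := by
      intro p hp
      rcases (PySem.List.mem_enumerate_iff _ _ _).mp hp with ⟨k, hk, rfl⟩
      apply hdigall
      have hmem : (pvRstrip0 num.toList)[k] ∈ pvRstrip0 num.toList ++ tlz :=
        List.mem_append_left _ (List.getElem_mem hk)
      rw [htl] at hmem
      exact hmem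
    have hpre : ∀ (j : Nat), (h : j < (pvRstrip0 num.toList).length) →
        PySem.List.pyGetD num.toList ((0 : Int) + j) ' ' = (pvRstrip0 num.toList)[j] := by
      intro j hj
      have h0j : ((0 : Int) + j) = (j : Int) := by omega
      rw [h0j, PySem.List.pyGetD_natCast]
      have hsw : num.toList.getD j ' ' = (pvRstrip0 num.toList ++ tlz).getD j ' ' := by rw [htl]
      rw [hsw, List.getD_append _ _ _ _ hj]
      exact List.getD_eq_getElem _ _ hj
    have e1 := pvRange_fold num.toList (pvRstrip0 num.toList)
      (pvStepP (num.toList.length : Int)) 0 (([] : List Char), false) hpre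
    rw [zero_add] at e1
    have e2 := pvA_fold (num.toList.length : Int) (PySem.List.enumerate (pvRstrip0 num.toList) 0)
      hdpairs [] false
    have e3 := pvB_fold (num.toList.length : Int) (PySem.List.enumerate (pvRstrip0 num.toList) 0)
      hdpairs []
    rw [pvStepA_eq, e1, e2, e3]
    simp
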